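-- pv_equiv track=rewrite | github.com/durrantmm/ISPeaks | scripts/6.validate_peak_calls.py | count_false_positives
-- ===== SOURCE A (Python) =====
-- def count_false_positives(peaks, sites):
--     count = 0
--     for peak in peaks:
--         p_contig, start, end = peak
--         true_pos = False
--         for site in sites:
--             s_contig, loc = site
--             if p_contig == s_contig:
--                 if start <= loc <= end:
--                     true_pos = True
--         if not true_pos:
--             count += 1
--     return count
-- ===== SOURCE B (Python) =====
-- def count_false_positives(peaks, sites):
--     by_contig = {}
--     for contig, loc in sites:
--         by_contig[contig] = by_contig.get(contig, []) + [loc]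
--     return sum(1 for contig, start, end in peaks
--                if not any(start <= loc <= end for loc in by_contig.get(contig, [])))
-- ===== Notes on version B (the rewrite author's own statement) =====
-- stated objective: faster
-- what changed: B builds a contig-to-locations index over the sites once, then decides each peak with a single any() over its own contig's locations, instead of scanning all sites for every peak.
import Mathlib
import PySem

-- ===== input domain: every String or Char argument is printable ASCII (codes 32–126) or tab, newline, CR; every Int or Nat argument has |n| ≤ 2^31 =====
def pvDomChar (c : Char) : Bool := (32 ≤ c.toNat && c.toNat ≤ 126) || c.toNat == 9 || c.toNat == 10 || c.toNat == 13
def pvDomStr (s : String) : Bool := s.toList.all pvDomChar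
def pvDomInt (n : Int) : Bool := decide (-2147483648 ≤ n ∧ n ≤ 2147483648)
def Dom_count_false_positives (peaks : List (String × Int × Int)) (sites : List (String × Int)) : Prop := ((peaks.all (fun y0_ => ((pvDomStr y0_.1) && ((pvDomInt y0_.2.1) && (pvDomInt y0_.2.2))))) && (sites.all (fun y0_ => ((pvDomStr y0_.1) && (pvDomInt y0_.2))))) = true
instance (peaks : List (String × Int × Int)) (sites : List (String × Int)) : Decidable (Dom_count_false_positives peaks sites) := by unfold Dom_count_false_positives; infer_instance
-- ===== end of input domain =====

-- B replaces A's scan of ALL sites per peak by a contig→locations index built once; per peak only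
-- its own contig's locations are checked.

-- ===== PORT A =====
-- literal transliteration: outer loop over peaks keeps `count`; inner loop over ALL sites keeps
-- the flag `true_pos`, setting it (never clearing) when contigs match and start <= loc <= end.
def count_false_positives (peaks : List (String × Int × Int)) (sites : List (String × Int)) : Int :=
  peaks.foldl (fun count peak =>
    let p_contig := peak.1
    let start := peak.2.1
    let «end» := peak.2.2
    let true_pos := sites.foldl (fun tp site =>
      if p_contig == site.1 then
        (if start ≤ site.2 ∧ site.2 ≤ «end» then true else tp)
      else tp) false
    if !true_pos then count + 1 else count) 0

-- ===== PORT B =====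
-- by_contig[contig] = by_contig.get(contig, []) + [loc]  →  Dict.modify;
-- sum(1 for … if not any(…)) → length of the filter (countP).
def count_false_positives_alt (peaks : List (String × Int × Int)) (sites : List (String × Int)) : Int :=
  let by_contig : PySem.Dict String (List Int) :=
    sites.foldl (fun d p => d.modify p.1 [] (· ++ [p.2])) PySem.Dict.empty
  ((peaks.countP (fun q =>
      !(by_contig.getD q.1 []).any (fun loc => decide (q.2.1 ≤ loc) && decide (loc ≤ q.2.2)))) : Int)

-- ===== PRECONDITION & SPEC =====
def Spec_count_false_positives (peaks : List (String × Int × Int)) (sites : List (String × Int)) (out : Int) : Prop := out = count_false_positives_alt peaks sites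
instance (peaks : List (String × Int × Int)) (sites : List (String × Int)) (out : Int) : Decidable (Spec_count_false_positives peaks sites out) := by unfold Spec_count_false_positives; infer_instance

-- ===== CLAIM (what is proved, stated in full; the proofs are below) =====
def Claim_equal_count_false_positives : Prop := ∀ (peaks : List (String × Int × Int)) (sites : List (String × Int)), Dom_count_false_positives peaks sites → Spec_count_false_positives peaks sites (count_false_positives peaks sites)

-- ===== LEMMAS AND PROOFS =====

-- A's inner flag loop computes "b OR some site matches".
theorem inner_fold_eq_any (c : String) (st en : Int) (sites : List (String × Int)) (b : Bool) :
    sites.foldl (fun tp site =>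
      if c == site.1 then (if st ≤ site.2 ∧ site.2 ≤ en then true else tp) else tp) b
    = (b || sites.any (fun s => c == s.1 && (decide (st ≤ s.2) && decide (s.2 ≤ en)))) := by
  induction sites generalizing b with
  | nil => simp
  | cons s rest ih =>
    simp only [List.foldl_cons, List.any_cons, ih]
    by_cases hc : c == s.1 <;> by_cases h1 : st ≤ s.2 <;> by_cases h2 : s.2 ≤ en <;>
      simp [hc, h1, h2]

-- the index lookup is the per-contig slice of sites
theorem index_getD (sites : List (String × Int)) (c : String) :
    (sites.foldl (fun d p => d.modify p.1 [] (· ++ [p.2]))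
        (PySem.Dict.empty : PySem.Dict String (List Int))).getD c []
      = (sites.filter (fun p => p.1 == c)).map (·.2) := by
  rw [PySem.Dict.getD_foldl_modify_append]
  simp

-- A's outer loop with accumulator = acc + countP
theorem outer_fold_eq_countP (peaks : List (String × Int × Int))
    (g : String × Int × Int → Bool) (acc : Int) :
    peaks.foldl (fun count peak => if !g peak then count + 1 else count) acc
    = acc + (peaks.countP (fun q => !g q) : Int) := by
  induction peaks generalizing acc with
  | nil => simp
  | cons p rest ih =>
    simp only [List.foldl_cons, List.countP_cons, ih]
    by_cases h : g p <;> simp [h, add_assoc, add_comm]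

-- ===== VERDICT (by name: the statement is the Claim_ definition above) =====
theorem count_false_positives_spec : Claim_equal_count_false_positives := by
  intro peaks sites _
  show count_false_positives peaks sites = count_false_positives_alt peaks sites
  unfold count_false_positives count_false_positives_alt
  simp only [inner_fold_eq_any, Bool.false_or, index_getD,
    outer_fold_eq_countP peaks
      (fun q => sites.any (fun s => q.1 == s.1 && (decide (q.2.1 ≤ s.2) && decide (s.2 ≤ q.2.2)))) 0,
    zero_add]
  congr 1
  apply List.countP_congr
  intro q _
  simp only [List.any_map, List.any_filter, Function.comp]
  -- the two any-predicates test the contig in opposite orders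
  have h : sites.any (fun s => q.1 == s.1 && (decide (q.2.1 ≤ s.2) && decide (s.2 ≤ q.2.2)))
      = sites.any (fun s => s.1 == q.1 && (decide (q.2.1 ≤ s.2) && decide (s.2 ≤ q.2.2))) :=
    by
      refine List.any_congr rfl (fun s => ?_)
      by_cases hc : q.1 = s.1
      · simp [hc]
      · rw [show (q.1 == s.1) = false by simp [hc], show (s.1 == q.1) = false by simp [Ne.symm hc]]
  rw [h]
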